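-- pv_equiv track=rewrite | github.com/s-surineni/atice | ppython/leet_code/find_valid_words_for_puzzle.py | find_valid_words
-- ===== SOURCE A (Python) =====
-- def find_valid_words(words, puzzle):
--     res = []
--     for a_puzz in puzzle:
--         first_char = a_puzz[0]
--         puzzle = set(a_puzz)
--         res.append(0)
--         for idx, a_word in enumerate(words):
--             a_word = set(a_word)
--             if first_char in a_word and a_word < puzzle:
--                 res[-1] += 1
--     return res
-- ===== SOURCE B (Python) =====
-- def find_valid_words(words, puzzle):
--     # Group words by their canonical letter-set once, then score each puzzle
--     # against the (usually much smaller) table of distinct letter-sets.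
--     counts = {}
--     for w in words:
--         k = ''.join(sorted(set(w)))
--         counts[k] = counts.get(k, 0) + 1
--     res = []
--     for p in puzzle:
--         first = p[0]
--         pset = set(p)
--         total = 0
--         for k, c in counts.items():
--             ks = set(k)
--             if first in ks and ks < pset:
--                 total += c
--         res.append(total)
--     return res
-- ===== Notes on version B (the rewrite author's own statement) =====
-- stated objective: faster
-- what changed: B builds a counter keyed by each word's canonical sorted letter-set once, then scores every puzzle against the table of distinct letter-sets, instead of rebuilding every word's set inside every puzzle iteration.
import Mathlib
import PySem

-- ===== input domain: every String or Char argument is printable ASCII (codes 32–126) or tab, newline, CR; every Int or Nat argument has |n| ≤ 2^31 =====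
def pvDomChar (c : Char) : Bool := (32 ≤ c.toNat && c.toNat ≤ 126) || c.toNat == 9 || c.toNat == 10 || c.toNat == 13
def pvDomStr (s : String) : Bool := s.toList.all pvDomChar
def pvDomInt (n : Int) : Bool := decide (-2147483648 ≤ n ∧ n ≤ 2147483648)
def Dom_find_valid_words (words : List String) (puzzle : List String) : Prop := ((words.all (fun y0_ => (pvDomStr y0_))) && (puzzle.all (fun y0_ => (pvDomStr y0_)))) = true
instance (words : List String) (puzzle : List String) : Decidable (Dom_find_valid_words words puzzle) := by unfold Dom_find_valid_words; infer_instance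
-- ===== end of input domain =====

-- B groups the words once by their canonical (sorted, deduplicated) letter-set and scores each
-- puzzle against that table of distinct letter-sets instead of re-deriving every word's set per puzzle.

-- ===== PORT A =====
-- Python's 'a_word < puzzle' (proper subset) is transliterated as issubset && not Set.equal.
def find_valid_words (words : List String) (puzzle : List String) : List Int :=
  puzzle.foldl (fun res a_puzz =>
    let first_char : Char := PySem.List.pyGetD a_puzz.toList 0 ' '  -- a_puzz[0]; exact under Pre_ (no empty puzzle string)
    let pz : PySem.Set Char := PySem.Set.ofList a_puzz.toList
    let res := res ++ [(0 : Int)]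
    words.foldl (fun res a_word =>
      let aw : PySem.Set Char := PySem.Set.ofList a_word.toList
      if aw.contains first_char && aw.issubset pz && !(PySem.Set.equal aw pz) then
        PySem.List.pySetD res (-1) (PySem.List.pyGetD res (-1) 0 + 1)  -- res[-1] += 1
      else res) res) []

-- ===== PORT B =====
-- ''.join(sorted(set(w)))
def fvwKey (w : String) : String :=
  String.ofList (PySem.List.sorted (PySem.Set.ofList w.toList) (fun c => c) false)

def find_valid_words_alt (words : List String) (puzzle : List String) : List Int :=
  let counts : PySem.Dict String Int :=
    words.foldl (fun d w => d.insert (fvwKey w) (d.getD (fvwKey w) 0 + 1)) PySem.Dict.empty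
  puzzle.foldl (fun res p =>
    let first : Char := PySem.List.pyGetD p.toList 0 ' '  -- p[0]; exact under Pre_
    let pset : PySem.Set Char := PySem.Set.ofList p.toList
    let total : Int := counts.items.foldl (fun total kc =>
      let ks : PySem.Set Char := PySem.Set.ofList kc.1.toList
      if ks.contains first && ks.issubset pset && !(PySem.Set.equal ks pset) then total + kc.2
      else total) 0
    res ++ [total]) []

-- ===== PRECONDITION & SPEC =====
-- Pre_ excludes exactly the inputs with an empty string in puzzle, where a_puzz[0] raises IndexError in A (and p[0] in B).
def Pre_find_valid_words (words : List String) (puzzle : List String) : Prop :=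
  ∀ p ∈ puzzle, p ≠ ""
instance (words : List String) (puzzle : List String) : Decidable (Pre_find_valid_words words puzzle) := by unfold Pre_find_valid_words; infer_instance

def pvWitness_find_valid_words : List String × List String := (["apple", "ant", ""], ["ant?", "Pla"])

def Spec_find_valid_words (words : List String) (puzzle : List String) (out : List Int) : Prop := out = find_valid_words_alt words puzzle
instance (words : List String) (puzzle : List String) (out : List Int) : Decidable (Spec_find_valid_words words puzzle out) := by unfold Spec_find_valid_words; infer_instance

-- ===== CLAIM (what is proved, stated in full; the proofs are below) =====
def Claim_equal_find_valid_words : Prop := ∀ (words : List String) (puzzle : List String), Dom_find_valid_words words puzzle → Pre_find_valid_words words puzzle → Spec_find_valid_words words puzzle (find_valid_words words puzzle)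

-- ===== LEMMAS AND PROOFS =====

-- the test both programs apply: first ∈ s and s a proper subset of ps
def fvwCond (first : Char) (ps : PySem.Set Char) (s : PySem.Set Char) : Bool :=
  s.contains first && s.issubset ps && !(PySem.Set.equal s ps)

-- the per-puzzle count both programs compute
def fvwF (words : List String) (p : String) : Int :=
  (words.countP (fun w => fvwCond (PySem.List.pyGetD p.toList 0 ' ')
    (PySem.Set.ofList p.toList) (PySem.Set.ofList w.toList)) : Int)

lemma fvwCond_congr (first : Char) (ps : PySem.Set Char) {s t : List Char} (h : s.Perm t) :
    fvwCond first ps s = fvwCond first ps t := by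
  have h1 : PySem.Set.contains s first = PySem.Set.contains t first := by
    rw [Bool.eq_iff_iff]; simp only [PySem.Set.contains_iff]; exact h.mem_iff
  have h2 : PySem.Set.issubset s ps = PySem.Set.issubset t ps := by
    rw [Bool.eq_iff_iff]; simp only [PySem.Set.issubset_iff]
    exact ⟨fun hh x hx => hh x (h.mem_iff.mpr hx), fun hh x hx => hh x (h.mem_iff.mp hx)⟩
  have h3 : PySem.Set.equal s ps = PySem.Set.equal t ps := by
    rw [Bool.eq_iff_iff]; simp only [PySem.Set.equal_iff]
    exact ⟨fun hh x => h.mem_iff.symm.trans (hh x), fun hh x => h.mem_iff.trans (hh x)⟩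
  unfold fvwCond
  rw [h1, h2, h3]

-- B's canonical key has the same letter-set as the word itself
lemma fvwCond_key (first : Char) (ps : PySem.Set Char) (w : String) :
    fvwCond first ps (PySem.Set.ofList (fvwKey w).toList)
      = fvwCond first ps (PySem.Set.ofList w.toList) := by
  have hperm : (PySem.List.sorted (PySem.Set.ofList w.toList) (fun c => c) false).Perm
      (PySem.Set.ofList w.toList) := PySem.List.sorted_perm _ _ _
  rw [show (fvwKey w).toList
      = PySem.List.sorted (PySem.Set.ofList w.toList) (fun c => c) false from by
    simp [fvwKey]]
  rw [PySem.Set.ofList_eq_self_of_nodup _ (hperm.nodup_iff.mpr (PySem.Set.nodup_ofList _))]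
  exact fvwCond_congr first ps hperm

-- res[-1] = v on a snoc list
lemma fvw_pySetD_append (xs : List Int) (x v : Int) :
    PySem.List.pySetD (xs ++ [x]) (-1) v = xs ++ [v] := by
  simp [PySem.List.pySetD, PySem.List.pySet?, PySem.List.pyIdx?, List.set_append]

-- A's inner loop: append 0 then 'res[-1] += 1' per matching word = snoc the count
lemma fvw_innerA (c : String → Bool) (words : List String) (pre : List Int) (n : Int) :
    words.foldl (fun res w =>
      if c w then PySem.List.pySetD res (-1) (PySem.List.pyGetD res (-1) 0 + 1) else res)
      (pre ++ [n]) = pre ++ [n + (words.countP c : Int)] := by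
  induction words generalizing n with
  | nil => simp
  | cons w ws ih =>
    simp only [List.foldl_cons]
    by_cases hc : c w
    · rw [if_pos hc, PySem.List.pyGetD_neg_one_append_singleton, fvw_pySetD_append, ih,
        List.countP_cons]
      simp only [hc, if_pos]
      push_cast
      ring_nf
    · rw [if_neg (by simp [hc]), ih, List.countP_cons]
      simp [hc]

lemma fvw_A_eq_map (words puzzle : List String) (acc : List Int) :
    puzzle.foldl (fun res a_puzz =>
      words.foldl (fun res a_word =>
        if (PySem.Set.ofList a_word.toList).contains (PySem.List.pyGetD a_puzz.toList 0 ' ') &&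
            (PySem.Set.ofList a_word.toList).issubset (PySem.Set.ofList a_puzz.toList) &&
            !(PySem.Set.equal (PySem.Set.ofList a_word.toList) (PySem.Set.ofList a_puzz.toList)) then
          PySem.List.pySetD res (-1) (PySem.List.pyGetD res (-1) 0 + 1)
        else res) (res ++ [(0 : Int)])) acc = acc ++ puzzle.map (fvwF words) := by
  induction puzzle generalizing acc with
  | nil => simp
  | cons p ps ih =>
    simp only [List.foldl_cons, List.map_cons]
    rw [fvw_innerA, ih]
    simp [fvwF, fvwCond]

lemma fvw_sum_single (D : List String) (x : String) (hD : D.Nodup) (hx : x ∈ D) (a : Int) :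
    (D.map (fun k => if k = x then a else 0)).sum = a := by
  induction D with
  | nil => cases hx
  | cons d D ih =>
    simp only [List.map_cons, List.sum_cons]
    rcases List.mem_cons.mp hx with rfl | hxD
    · rw [if_pos rfl]
      rw [List.sum_eq_zero (by
        intro y hy
        obtain ⟨k, hk, rfl⟩ := List.mem_map.mp hy
        rw [if_neg]
        rintro rfl
        exact (List.nodup_cons.mp hD).1 hk)]
      ring
    · rw [if_neg (by rintro rfl; exact (List.nodup_cons.mp hD).1 hxD),
        ih (List.nodup_cons.mp hD).2 hxD]
      ring

-- grouping: a sum of counts over the distinct keys is the plain filtered count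
lemma fvw_sum_ite_count (q : String → Bool) (l D : List String) (hD : D.Nodup)
    (hsub : ∀ x ∈ l, x ∈ D) :
    (D.map (fun k => if q k then (l.count k : Int) else 0)).sum = (l.countP q : Int) := by
  induction l with
  | nil => simp
  | cons x l ih =>
    have hxD : x ∈ D := hsub x List.mem_cons_self
    have hstep : (fun k => if q k then ((x :: l).count k : Int) else 0)
        = fun k => (if q k then (l.count k : Int) else 0)
            + (if k = x then (if q x then (1 : Int) else 0) else 0) := by
      funext k
      by_cases hk : k = x
      · subst hk
        by_cases hq : q k <;> simp [hq]
      · have hcnt : (x :: l).count k = l.count k := by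
          rw [List.count_cons]
          simp [Ne.symm hk]
        by_cases hq : q k <;> simp [hq, hcnt, hk]
    rw [hstep, PySem.List.sum_map_add_int,
      ih (fun y hy => hsub y (List.mem_cons_of_mem _ hy)),
      fvw_sum_single D x hD hxD, List.countP_cons]
    by_cases hq : q x <;> simp [hq]

-- B's per-puzzle pass over the counter table equals the direct count over words
lemma fvw_B_total (words : List String) (first : Char) (ps : PySem.Set Char) :
    (((PySem.Set.ofList (words.map fvwKey)).map
        (fun k => (k, ((words.map fvwKey).count k : Int)))).foldl (fun total kc =>
      if (PySem.Set.ofList kc.1.toList).contains first &&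
          (PySem.Set.ofList kc.1.toList).issubset ps &&
          !(PySem.Set.equal (PySem.Set.ofList kc.1.toList) ps) then total + kc.2
      else total) 0)
    = (words.countP (fun w => fvwCond first ps (PySem.Set.ofList w.toList)) : Int) := by
  rw [List.foldl_map]
  rw [show (fun (total : Int) (k : String) =>
      if (PySem.Set.ofList k.toList).contains first &&
          (PySem.Set.ofList k.toList).issubset ps &&
          !(PySem.Set.equal (PySem.Set.ofList k.toList) ps) then
        total + ((words.map fvwKey).count k : Int)
      else total)
      = fun (total : Int) (k : String) => total +
          (if fvwCond first ps (PySem.Set.ofList k.toList) then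
            ((words.map fvwKey).count k : Int) else 0) from by
    funext total k
    simp only [fvwCond]
    split <;> simp]
  rw [PySem.List.foldl_add]
  rw [fvw_sum_ite_count (fun k => fvwCond first ps (PySem.Set.ofList k.toList))
    (words.map fvwKey) _ (PySem.Set.nodup_ofList _)
    (fun x hx => (PySem.Set.mem_ofList _ _).mpr hx)]
  rw [List.countP_map]
  rw [List.countP_congr (fun w _ => by
    simp only [Function.comp]
    rw [fvwCond_key])]
  simp

lemma fvw_B_eq_map (words puzzle : List String) :
    find_valid_words_alt words puzzle = puzzle.map (fvwF words) := by
  simp only [find_valid_words_alt]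
  rw [show (words.foldl (fun d w => d.insert (fvwKey w) (d.getD (fvwKey w) 0 + 1))
      PySem.Dict.empty) = PySem.Dict.counter (words.map fvwKey) from by
    rw [← PySem.Dict.foldl_insert_getD_add_one_eq_counter, List.foldl_map]]
  rw [PySem.Dict.items_counter]
  rw [PySem.List.foldl_append_singleton_eq_map
    (fun p => (((PySem.Set.ofList (words.map fvwKey)).map
        (fun k => (k, ((words.map fvwKey).count k : Int)))).foldl (fun total kc =>
      if (PySem.Set.ofList kc.1.toList).contains (PySem.List.pyGetD p.toList 0 ' ') &&
          (PySem.Set.ofList kc.1.toList).issubset (PySem.Set.ofList p.toList) &&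
          !(PySem.Set.equal (PySem.Set.ofList kc.1.toList) (PySem.Set.ofList p.toList)) then
        total + kc.2
      else total) 0)) puzzle []]
  rw [List.nil_append]
  apply List.map_congr_left
  intro p _
  rw [fvw_B_total]
  rfl

-- ===== VERDICT (by name: the statement is the Claim_ definition above) =====
theorem find_valid_words_spec : Claim_equal_find_valid_words := by
  intro words puzzle _ _
  unfold Spec_find_valid_words
  rw [fvw_B_eq_map]
  exact fvw_A_eq_map words puzzle []
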